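-- pv_equiv track=rewrite | github.com/VictorHSCosta/Trabalho-Teleinform-tica-e-Redes-1 | Legado/Backend_teste_junto/modulador.py | modular_bipolar
-- ===== SOURCE A (Python) =====
-- def modular_bipolar(bits, amostras_por_bit=100):
--     """
--     Modula um trem de bits em bipolar e gera um sinal digital contínuo.
--     :param bits: Lista de bits (0 ou 1).
--     :param amostras_por_bit: Número de amostras por bit no sinal digital.
--     :return: Lista representando o sinal digital contínuo.
--     """
--     sinal = []
--     toggle = 1
--     for bit in bits:
--         if bit == 1:
--             sinal.extend([toggle] * amostras_por_bit)
--             toggle *= -1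
--         else:
--             sinal.extend([0] * amostras_por_bit)
--     return sinal
-- ===== SOURCE B (Python) =====
-- def modular_bipolar(bits, amostras_por_bit=100):
--     """Preallocate an all-zero signal of full length, then overwrite the sample
--     block of each 1-bit via slice assignment, its sign given by the parity of
--     its rank among the 1-bits.  Zero bits are never looped over individually."""
--     k = amostras_por_bit
--     sinal = [0] * (len(bits) * k)
--     uns = [i for i, bit in enumerate(bits) if bit == 1]
--     for rank, pos in enumerate(uns):
--         sinal[pos * k:(pos + 1) * k] = [1 if rank % 2 == 0 else -1] * k
--     return sinal
-- ===== Notes on version B (the rewrite author's own statement) =====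
-- stated objective: alternative
-- what changed: A emits the signal sequentially bit by bit with a sign toggle; B preallocates the full all-zero signal, indexes the 1-bit positions once, and overwrites only those sample blocks by slice assignment with the sign taken from each 1-bit's rank parity.
import Mathlib
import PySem

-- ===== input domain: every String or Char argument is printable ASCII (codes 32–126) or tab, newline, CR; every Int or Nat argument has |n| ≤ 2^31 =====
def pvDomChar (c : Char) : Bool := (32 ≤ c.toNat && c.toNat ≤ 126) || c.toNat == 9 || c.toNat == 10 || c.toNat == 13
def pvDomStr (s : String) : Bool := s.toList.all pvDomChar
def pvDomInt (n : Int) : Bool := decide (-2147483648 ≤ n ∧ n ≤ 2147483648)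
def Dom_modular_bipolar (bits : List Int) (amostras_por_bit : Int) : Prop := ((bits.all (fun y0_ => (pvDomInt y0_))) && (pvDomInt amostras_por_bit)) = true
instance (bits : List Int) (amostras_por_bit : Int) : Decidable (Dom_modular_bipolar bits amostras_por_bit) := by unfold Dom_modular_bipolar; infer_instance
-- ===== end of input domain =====

-- B preallocates an all-zero signal and overwrites only the 1-bits' sample blocks by slice assignment (sign = rank parity among the 1-bits), instead of A's sequential emit-per-bit loop with a toggle; objective: alternative.


-- ===== PORT A =====
-- A: one loop; sinal.extend([toggle]*n) / .extend([0]*n); toggle *= -1 on each 1-bit.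
-- [x]*n with n ≤ 0 is [] in Python, matched exactly by List.replicate n.toNat.
def modular_bipolar (bits : List Int) (amostras_por_bit : Int) : List Int :=
  (bits.foldl
    (fun st bit =>
      if bit == 1 then
        (st.1 ++ List.replicate amostras_por_bit.toNat st.2, st.2 * (-1))
      else
        (st.1 ++ List.replicate amostras_por_bit.toNat (0 : Int), st.2))
    (([] : List Int), (1 : Int))).1

-- ===== PORT B =====
-- B (Source B): sinal = [0]*(len(bits)*k); uns = [i for i,bit in enumerate(bits) if bit==1];
-- for rank,pos in enumerate(uns): sinal[pos*k:(pos+1)*k] = [±1]*k.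
-- Slice assignment l[a:b] = x is ported as l[:a] ++ x ++ l[b:] via PySem.List.slice, which is
-- exact here: the clamped start never exceeds the clamped stop (k > 0 keeps a ≤ b ≤ len; k ≤ 0
-- makes sinal empty, where every slice is []).
def modular_bipolar_alt (bits : List Int) (amostras_por_bit : Int) : List Int :=
  let k := amostras_por_bit
  let sinal : List Int := List.replicate ((bits.length : Int) * k).toNat (0 : Int)
  let uns : List Int := ((PySem.List.enumerate bits 0).filter (fun p => p.2 == 1)).map (fun p => p.1)
  (PySem.List.enumerate uns 0).foldl
    (fun sinal rp =>
      PySem.List.slice sinal none (some (rp.2 * k)) ++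
        List.replicate k.toNat (if PySem.Int.mod rp.1 2 == 0 then (1 : Int) else -1) ++
        PySem.List.slice sinal (some ((rp.2 + 1) * k)) none)
    sinal

-- ===== PRECONDITION & SPEC =====
def Spec_modular_bipolar (bits : List Int) (amostras_por_bit : Int) (out : List Int) : Prop := out = modular_bipolar_alt bits amostras_por_bit
instance (bits : List Int) (amostras_por_bit : Int) (out : List Int) : Decidable (Spec_modular_bipolar bits amostras_por_bit out) := by unfold Spec_modular_bipolar; infer_instance

-- ===== CLAIM (what is proved, stated in full; the proofs are below) =====
def Claim_equal_modular_bipolar : Prop := ∀ (bits : List Int) (amostras_por_bit : Int), Dom_modular_bipolar bits amostras_por_bit → Spec_modular_bipolar bits amostras_por_bit (modular_bipolar bits amostras_por_bit)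

-- ===== LEMMAS AND PROOFS =====

-- the bipolar sign for a 1-bit of rank r
def pvSign (r : Int) : Int := if PySem.Int.mod r 2 == 0 then 1 else -1

-- the per-bit level list: 0 for a non-1 bit, pvSign of the running rank for a 1-bit
def pvNiv : List Int → Int → List Int
  | [], _ => []
  | b :: bs, r => if b == 1 then pvSign r :: pvNiv bs (r + 1) else (0 : Int) :: pvNiv bs r

-- block expansion
def pvF (k : Nat) (ls : List Int) : List Int := ls.flatMap (fun v => List.replicate k v)

-- the positions of the 1-bits
def pvUns (bits : List Int) : List Int :=
  ((PySem.List.enumerate bits 0).filter (fun p => p.2 == 1)).map (fun p => p.1)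

-- the effect of B's fold on the level list: sequential set
def pvApply (ls : List Int) (pairs : List (Int × Int)) : List Int :=
  pairs.foldl (fun ls rp => ls.set rp.2.toNat (pvSign rp.1)) ls

-- ---- A's loop characterised ----

def pvGoA (n : Nat) : List Int → Int → List Int
  | [], _ => []
  | bit :: bs, t =>
    if bit == 1 then List.replicate n t ++ pvGoA n bs (t * (-1))
    else List.replicate n (0 : Int) ++ pvGoA n bs t

theorem pvFoldA (n : Nat) (bits : List Int) :
    ∀ (s : List Int) (t : Int),
      (bits.foldl
        (fun st bit =>
          if bit == 1 then (st.1 ++ List.replicate n st.2, st.2 * (-1))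
          else (st.1 ++ List.replicate n (0 : Int), st.2))
        (s, t)).1 = s ++ pvGoA n bits t := by
  induction bits with
  | nil => intro s t; simp [pvGoA]
  | cons b bs ih =>
    intro s t
    rw [List.foldl_cons]
    by_cases hb : b == 1
    · rw [if_pos hb, ih, pvGoA, if_pos hb, List.append_assoc]
    · rw [if_neg hb, ih, pvGoA, if_neg hb, List.append_assoc]

theorem pvParity (n : Nat) (bits : List Int) :
    ∀ (r : Int), pvGoA n bits (pvSign r) = pvF n (pvNiv bits r) := by
  induction bits with
  | nil => intro r; simp [pvGoA, pvNiv, pvF]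
  | cons b bs ih =>
    intro r
    have hmod : PySem.Int.mod r 2 = r % 2 := PySem.Int.mod_eq_emod_of_pos (by norm_num)
    have hmod1 : PySem.Int.mod (r + 1) 2 = (r + 1) % 2 := PySem.Int.mod_eq_emod_of_pos (by norm_num)
    by_cases hb : b == 1
    · by_cases he : r % 2 = 0
      · have t0 : pvSign r = 1 := by unfold pvSign; rw [hmod]; simp [he]
        have t1 : pvSign (r + 1) = -1 := by
          unfold pvSign; rw [hmod1]; have : (r + 1) % 2 = 1 := by omega
          simp [this]
        have hrec := ih (r + 1); rw [t1] at hrec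
        rw [t0, pvGoA, if_pos hb, pvNiv, if_pos hb, t0, pvF, List.flatMap_cons]
        norm_num [pvF] at hrec ⊢
        exact hrec
      · have t0 : pvSign r = -1 := by
          unfold pvSign; rw [hmod]; have : r % 2 = 1 := by omega
          simp [this]
        have t1 : pvSign (r + 1) = 1 := by
          unfold pvSign; rw [hmod1]; have : (r + 1) % 2 = 0 := by omega
          simp [this]
        have hrec := ih (r + 1); rw [t1] at hrec
        rw [t0, pvGoA, if_pos hb, pvNiv, if_pos hb, t0, pvF, List.flatMap_cons]
        norm_num [pvF] at hrec ⊢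
        exact hrec
    · rw [pvGoA, if_neg hb, pvNiv, if_neg hb, pvF, List.flatMap_cons, ih]
      rfl

-- ---- block expansion vs take / drop / set ----

theorem pvF_take (k : Nat) (ls : List Int) : ∀ p : Nat, (pvF k ls).take (p * k) = pvF k (ls.take p) := by
  induction ls with
  | nil => intro p; simp [pvF]
  | cons x xs ih =>
    intro p
    cases p with
    | zero => simp [pvF]
    | succ q =>
      have hlen : (List.replicate k x).length = k := List.length_replicate
      rw [pvF, List.flatMap_cons, List.take_succ_cons, pvF, List.flatMap_cons]
      have : (q + 1) * k = (List.replicate k x).length + q * k := by rw [hlen]; ring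
      rw [this, List.take_length_add_append, ← pvF, ← pvF, ih]

theorem pvF_drop (k : Nat) (ls : List Int) : ∀ p : Nat, (pvF k ls).drop (p * k) = pvF k (ls.drop p) := by
  induction ls with
  | nil => intro p; simp [pvF]
  | cons x xs ih =>
    intro p
    cases p with
    | zero => simp
    | succ q =>
      have hlen : (List.replicate k x).length = k := List.length_replicate
      rw [pvF, List.flatMap_cons, List.drop_succ_cons]
      have : (q + 1) * k = (List.replicate k x).length + q * k := by rw [hlen]; ring
      rw [this, List.drop_length_add_append, ← pvF, ih]

theorem pvF_set (k : Nat) (ls : List Int) (p : Nat) (v : Int) (hp : p < ls.length) :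
    pvF k (ls.set p v) = pvF k (ls.take p) ++ List.replicate k v ++ pvF k (ls.drop (p + 1)) := by
  rw [List.set_eq_take_cons_drop v hp, pvF, List.flatMap_append, List.flatMap_cons, ← pvF, ← pvF,
    ← List.append_assoc]

-- one slice-assignment on a block-structured signal is a set on the level list
theorem pvWrite (k : Int) (hk : 0 < k) (ls : List Int) (p : Int) (hp0 : 0 ≤ p)
    (hp : p.toNat < ls.length) (v : Int) :
    PySem.List.slice (pvF k.toNat ls) none (some (p * k)) ++ List.replicate k.toNat v ++
      PySem.List.slice (pvF k.toNat ls) (some ((p + 1) * k)) none = pvF k.toNat (ls.set p.toNat v) := by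
  have hpk : (0 : Int) ≤ p * k := mul_nonneg hp0 (le_of_lt hk)
  have hpk1 : (0 : Int) ≤ (p + 1) * k := mul_nonneg (by omega) (le_of_lt hk)
  rw [PySem.List.slice_to _ hpk, PySem.List.slice_from _ hpk1]
  have hk' : k = (k.toNat : Int) := (Int.toNat_of_nonneg (le_of_lt hk)).symm
  have hp' : p = (p.toNat : Int) := (Int.toNat_of_nonneg hp0).symm
  have e1 : (p * k).toNat = p.toNat * k.toNat := by
    rw [hp', hk', ← Nat.cast_mul, Int.toNat_natCast, Int.toNat_natCast, Int.toNat_natCast]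
  have e2 : ((p + 1) * k).toNat = (p.toNat + 1) * k.toNat := by
    rw [hp', hk', show ((p.toNat : Int) + 1) = ((p.toNat + 1 : Nat) : Int) by push_cast; ring,
      ← Nat.cast_mul, Int.toNat_natCast, Int.toNat_natCast, Int.toNat_natCast]
  rw [e1, e2, pvF_take, pvF_drop, pvF_set k.toNat ls p.toNat v hp]

-- B's fold over the enumerated 1-positions, on a block-structured signal, is pvApply on the levels
theorem pvFoldB (k : Int) (hk : 0 < k) :
    ∀ (pairs : List (Int × Int)) (ls : List Int),
      (∀ rp ∈ pairs, 0 ≤ rp.2 ∧ rp.2.toNat < ls.length) →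
      pairs.foldl
        (fun sinal rp =>
          PySem.List.slice sinal none (some (rp.2 * k)) ++
            List.replicate k.toNat (if PySem.Int.mod rp.1 2 == 0 then (1 : Int) else -1) ++
            PySem.List.slice sinal (some ((rp.2 + 1) * k)) none)
        (pvF k.toNat ls) = pvF k.toNat (pvApply ls pairs) := by
  intro pairs
  induction pairs with
  | nil => intro ls _; simp [pvApply]
  | cons rp rest ih =>
    intro ls h
    have h0 := h rp (List.mem_cons_self)
    rw [List.foldl_cons,
      pvWrite k hk ls rp.2 h0.1 h0.2 (if PySem.Int.mod rp.1 2 == 0 then (1 : Int) else -1)]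
    rw [ih (ls.set rp.2.toNat _) (by
      intro q hq
      have := h q (List.mem_cons_of_mem _ hq)
      simpa using this)]
    rfl

-- ---- the 1-positions ----

theorem pvUns_shift (bits : List Int) : ∀ s : Int,
    ((PySem.List.enumerate bits (s + 1)).filter (fun p => p.2 == 1)).map (fun p => p.1) =
      (((PySem.List.enumerate bits s).filter (fun p => p.2 == 1)).map (fun p => p.1)).map (· + 1) := by
  induction bits with
  | nil => intro s; simp [PySem.List.enumerate_nil]
  | cons b bs ih =>
    intro s
    rw [PySem.List.enumerate_cons, PySem.List.enumerate_cons]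
    by_cases hb : (b == 1) = true
    · simp [hb, ih (s + 1)]
    · simp [hb, ih (s + 1)]

theorem pvUns_cons (b : Int) (bs : List Int) :
    pvUns (b :: bs) = (if b == 1 then [(0 : Int)] else []) ++ (pvUns bs).map (· + 1) := by
  unfold pvUns
  rw [PySem.List.enumerate_cons]
  have h := pvUns_shift bs 0
  norm_num at h
  by_cases hb : (b == 1) = true
  · simp [hb, h]
  · simp [hb, h]

theorem pvUns_bounds (bits : List Int) : ∀ q ∈ pvUns bits, 0 ≤ q ∧ q.toNat < bits.length := by
  induction bits with
  | nil => intro q hq; simp [pvUns, PySem.List.enumerate_nil] at hq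
  | cons b bs ih =>
    intro q hq
    rw [pvUns_cons] at hq
    rcases List.mem_append.mp hq with h | h
    · by_cases hb : b == 1
      · rw [if_pos hb] at h; simp at h; subst h; simp
      · rw [if_neg hb] at h; simp at h
    · rcases List.mem_map.mp h with ⟨q', hq', rfl⟩
      have := ih q' hq'
      constructor
      · omega
      · simp only [List.length_cons]
        omega

-- applying sets at shifted positions to a cons leaves the head alone
theorem pvApply_shift (x : Int) : ∀ (uns : List Int) (r : Int) (ls : List Int),
    (∀ q ∈ uns, 0 ≤ q) →
    pvApply (x :: ls) (PySem.List.enumerate (uns.map (· + 1)) r) =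
      x :: pvApply ls (PySem.List.enumerate uns r) := by
  intro uns
  induction uns with
  | nil => intro r ls _; simp [pvApply, PySem.List.enumerate_nil]
  | cons q qs ih =>
    intro r ls h
    have hq : 0 ≤ q := h q (List.mem_cons_self)
    rw [List.map_cons, PySem.List.enumerate_cons, PySem.List.enumerate_cons]
    unfold pvApply
    rw [List.foldl_cons, List.foldl_cons]
    have hset : (x :: ls).set (q + 1).toNat (pvSign r) = x :: ls.set q.toNat (pvSign r) := by
      have : (q + 1).toNat = q.toNat + 1 := by omega
      rw [this, List.set_cons_succ]
    rw [hset]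
    exact ih (r + 1) (ls.set q.toNat (pvSign r)) (fun p hp => h p (List.mem_cons_of_mem _ hp))

-- setting each 1-position (in rank order) into the all-zero level list gives pvNiv
theorem pvApply_niv (bits : List Int) : ∀ r : Int,
    pvApply (List.replicate bits.length (0 : Int)) (PySem.List.enumerate (pvUns bits) r) =
      pvNiv bits r := by
  induction bits with
  | nil => intro r; simp [pvApply, pvUns, pvNiv, PySem.List.enumerate_nil]
  | cons b bs ih =>
    intro r
    have hb0 : ∀ q ∈ pvUns bs, 0 ≤ q := fun q hq => (pvUns_bounds bs q hq).1
    rw [pvUns_cons, List.length_cons, List.replicate_succ]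
    by_cases hb : b == 1
    · rw [if_pos hb]
      rw [show ([(0 : Int)] ++ (pvUns bs).map (· + 1)) = (0 : Int) :: (pvUns bs).map (· + 1) from rfl,
        PySem.List.enumerate_cons]
      unfold pvApply
      rw [List.foldl_cons]
      have hset : ((0 : Int) :: List.replicate bs.length (0 : Int)).set (0 : Int).toNat (pvSign r) =
          pvSign r :: List.replicate bs.length (0 : Int) := by simp
      rw [hset, ← pvApply]
      rw [pvApply_shift (pvSign r) (pvUns bs) (r + 1) _ hb0, ih (r + 1), pvNiv, if_pos hb]
    · rw [if_neg hb, List.nil_append,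
        pvApply_shift (0 : Int) (pvUns bs) r _ hb0, ih r, pvNiv, if_neg hb]

-- the all-zero signal is the expansion of the all-zero level list
theorem pvF_replicate_zero (k n : Nat) : pvF k (List.replicate n (0 : Int)) = List.replicate (n * k) (0 : Int) := by
  induction n with
  | zero => simp [pvF]
  | succ m ih =>
    rw [List.replicate_succ, pvF, List.flatMap_cons, ← pvF, ih, Nat.succ_mul, Nat.add_comm,
      ← List.replicate_add]

-- the degenerate case k ≤ 0: B's writes keep the empty signal empty
theorem pvB_nonpos (k : Int) (hk : k ≤ 0) (pairs : List (Int × Int)) :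
    pairs.foldl
      (fun sinal rp =>
        PySem.List.slice sinal none (some (rp.2 * k)) ++
          List.replicate k.toNat (if PySem.Int.mod rp.1 2 == 0 then (1 : Int) else -1) ++
          PySem.List.slice sinal (some ((rp.2 + 1) * k)) none)
      ([] : List Int) = [] := by
  induction pairs with
  | nil => rfl
  | cons rp rest ih =>
    rw [List.foldl_cons]
    have hke : k.toNat = 0 := by omega
    have hacc : PySem.List.slice ([] : List Int) none (some (rp.2 * k)) ++
        List.replicate k.toNat (if PySem.Int.mod rp.1 2 == 0 then (1 : Int) else -1) ++
        PySem.List.slice ([] : List Int) (some ((rp.2 + 1) * k)) none = [] := by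
      simp [PySem.List.slice, hke]
    rw [hacc]
    exact ih

-- ===== VERDICT (by name: the statement is the Claim_ definition above) =====
theorem modular_bipolar_spec : Claim_equal_modular_bipolar := by
  intro bits k _
  unfold Spec_modular_bipolar modular_bipolar modular_bipolar_alt
  rw [pvFoldA k.toNat bits [] 1]
  have hA : pvGoA k.toNat bits 1 = pvF k.toNat (pvNiv bits 0) := by
    have := pvParity k.toNat bits 0
    simpa [pvSign, PySem.Int.mod] using this
  rw [List.nil_append, hA]
  show pvF k.toNat (pvNiv bits 0) =
    (PySem.List.enumerate (pvUns bits) 0).foldl _ (List.replicate ((bits.length : Int) * k).toNat (0 : Int))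
  by_cases hk : 0 < k
  · have hrep : List.replicate ((bits.length : Int) * k).toNat (0 : Int) =
        pvF k.toNat (List.replicate bits.length (0 : Int)) := by
      rw [pvF_replicate_zero]
      congr 1
      rw [show ((bits.length : Int)) * k = ((bits.length * k.toNat : Nat) : Int) by
            rw [Nat.cast_mul]; rw [Int.toNat_of_nonneg (le_of_lt hk)],
        Int.toNat_natCast]
    rw [hrep]
    rw [pvFoldB k hk (PySem.List.enumerate (pvUns bits) 0) (List.replicate bits.length (0 : Int))
      (by
        intro rp hrp
        rcases (PySem.List.mem_enumerate_iff _ _ _).mp hrp with ⟨j, hj, rfl⟩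
        have := pvUns_bounds bits _ (List.getElem_mem hj)
        simp at this ⊢
        exact this)]
    rw [pvApply_niv bits 0]
  · have hke : ((bits.length : Int) * k).toNat = 0 := by
      have : (bits.length : Int) * k ≤ 0 := mul_nonpos_of_nonneg_of_nonpos (Int.natCast_nonneg _) (by omega)
      omega
    rw [hke, List.replicate_zero, pvB_nonpos k (by omega)]
    have hz : k.toNat = 0 := by omega
    rw [hz]
    simp [pvF]
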